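-- pv_equiv track=rewrite | github.com/paras-a/Data-Structures-and-Algorithms | Arrays/arrays.py | merge_three_arrays
-- ===== SOURCE A (Python) =====
-- def merge_three_arrays(arr1, arr2, arr3):
--     """
--     Merge three arrays into a single array, interleaving elements in order.
--
--     @param arr1: List[int] -- First array of integers
--     @param arr2: List[int] -- Second array of integers
--     @param arr3: List[int] -- Third array of integers
--     @return: List[int] -- Interleaved array
--     @example:
--         >>> merge_three_arrays([1, 4], [2, 5], [3, 6])
--         [1, 2, 3, 4, 5, 6]
--         >>> merge_three_arrays([1], [2], [3])
--         [1, 2, 3]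
--         >>> merge_three_arrays([], [1], [2])
--         [1, 2]
--         >>> merge_three_arrays([1, 2], [], [3])
--         [1, 3, 2]
--         >>> merge_three_arrays([1, 1], [2, 2], [])
--         [1, 2, 1, 2]
--     """
--     interleaved = []
--     max_length = max(len(arr1), len(arr2), len(arr3))
--     for i in range(max_length):
--         if i < len(arr1):
--             interleaved.append(arr1[i])
--         if i < len(arr2):
--             interleaved.append(arr2[i])
--         if i < len(arr3):
--             interleaved.append(arr3[i])
--     return interleaved
-- ===== SOURCE B (Python) =====
-- def merge_three_arrays(arr1, arr2, arr3):
--     """Interleave column by column by consuming three reversed stacks with pop(),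
--     instead of an index loop with bounds checks."""
--     r1, r2, r3 = arr1[::-1], arr2[::-1], arr3[::-1]
--     out = []
--     while r1 or r2 or r3:
--         if r1:
--             out.append(r1.pop())
--         if r2:
--             out.append(r2.pop())
--         if r3:
--             out.append(r3.pop())
--     return out
-- ===== Notes on version B (the rewrite author's own statement) =====
-- stated objective: alternative
-- what changed: Replaces the index loop over range(max(len,...)) with i<len bounds checks by consuming three reversed copies as stacks: while any is nonempty, pop one element from each nonempty stack per round.
import Mathlib
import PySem

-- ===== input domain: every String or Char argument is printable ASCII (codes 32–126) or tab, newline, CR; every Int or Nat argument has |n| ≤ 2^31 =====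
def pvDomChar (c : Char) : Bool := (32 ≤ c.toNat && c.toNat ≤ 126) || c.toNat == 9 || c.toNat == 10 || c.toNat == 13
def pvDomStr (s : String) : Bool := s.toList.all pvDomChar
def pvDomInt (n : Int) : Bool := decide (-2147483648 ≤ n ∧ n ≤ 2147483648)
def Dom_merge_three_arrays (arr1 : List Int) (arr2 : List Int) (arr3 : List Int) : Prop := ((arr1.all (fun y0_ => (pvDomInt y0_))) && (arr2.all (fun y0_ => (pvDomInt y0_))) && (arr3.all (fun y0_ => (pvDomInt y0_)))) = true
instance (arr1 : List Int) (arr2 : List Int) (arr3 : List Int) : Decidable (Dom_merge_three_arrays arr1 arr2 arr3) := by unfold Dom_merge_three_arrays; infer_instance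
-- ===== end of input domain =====

-- B interleaves by consuming three reversed copies as stacks (pop one element from each
-- nonempty stack per round) instead of A's index loop over range(max length) with bounds checks.

-- ===== PORT A =====
def merge_three_arrays (arr1 : List Int) (arr2 : List Int) (arr3 : List Int) : List Int :=
  let maxLength := max (max arr1.length arr2.length) arr3.length
  (List.range maxLength).foldl (fun interleaved i =>
    let interleaved := if i < arr1.length then interleaved ++ [arr1.getD i 0] else interleaved
    let interleaved := if i < arr2.length then interleaved ++ [arr2.getD i 0] else interleaved
    let interleaved := if i < arr3.length then interleaved ++ [arr3.getD i 0] else interleaved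
    interleaved) []

-- ===== PORT B =====
-- B's while loop: `if col: out.append(col.pop())` — the pop happens only when the stack is
-- nonempty; since List.dropLast [] = [], dropping the last element unconditionally while
-- appending only in the branch computes exactly the same state.
def mergeThreeLoop (r1 r2 r3 out : List Int) : List Int :=
  if h : r1 = [] ∧ r2 = [] ∧ r3 = [] then out
  else
    let out := if r1 ≠ [] then out ++ [r1.getLastD 0] else out
    let out := if r2 ≠ [] then out ++ [r2.getLastD 0] else out
    let out := if r3 ≠ [] then out ++ [r3.getLastD 0] else out
    mergeThreeLoop r1.dropLast r2.dropLast r3.dropLast out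
termination_by r1.length + r2.length + r3.length
decreasing_by
  simp only [← List.length_eq_zero_iff] at h
  try simp only [List.length_dropLast]
  omega

def merge_three_arrays_alt (arr1 : List Int) (arr2 : List Int) (arr3 : List Int) : List Int :=
  mergeThreeLoop arr1.reverse arr2.reverse arr3.reverse []

-- ===== PRECONDITION & SPEC =====
def Spec_merge_three_arrays (arr1 : List Int) (arr2 : List Int) (arr3 : List Int) (out : List Int) : Prop := out = merge_three_arrays_alt arr1 arr2 arr3
instance (arr1 : List Int) (arr2 : List Int) (arr3 : List Int) (out : List Int) : Decidable (Spec_merge_three_arrays arr1 arr2 arr3 out) := by unfold Spec_merge_three_arrays; infer_instance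

-- ===== CLAIM (what is proved, stated in full; the proofs are below) =====
def Claim_equal_merge_three_arrays : Prop := ∀ (arr1 : List Int) (arr2 : List Int) (arr3 : List Int), Dom_merge_three_arrays arr1 arr2 arr3 → Spec_merge_three_arrays arr1 arr2 arr3 (merge_three_arrays arr1 arr2 arr3)

-- ===== LEMMAS AND PROOFS =====

/-- One column of A's loop: what iteration `i` appends. -/
def gcol (a b c : List Int) (i : Nat) : List Int :=
  (if i < a.length then [a.getD i 0] else []) ++
  (if i < b.length then [b.getD i 0] else []) ++
  (if i < c.length then [c.getD i 0] else [])

theorem A_eq_flatMap (a b c : List Int) :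
    merge_three_arrays a b c
      = (List.range (max (max a.length b.length) c.length)).flatMap (gcol a b c) := by
  unfold merge_three_arrays
  have hbody : (fun (interleaved : List Int) (i : Nat) =>
      let interleaved := if i < a.length then interleaved ++ [a.getD i 0] else interleaved
      let interleaved := if i < b.length then interleaved ++ [b.getD i 0] else interleaved
      let interleaved := if i < c.length then interleaved ++ [c.getD i 0] else interleaved
      interleaved)
      = fun interleaved i => interleaved ++ gcol a b c i := by
    funext acc i
    simp only [gcol]
    split_ifs <;> simp
  rw [hbody, PySem.List.foldl_append_eq_flatMap]
  simp

theorem col_zero (l : List Int) :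
    (if l.reverse ≠ [] then [l.reverse.getLastD 0] else []) =
    (if 0 < l.length then [l.getD 0 0] else []) := by
  cases l <;> simp

theorem col_succ (l : List Int) (i : Nat) :
    (if i + 1 < l.length then [l.getD (i + 1) 0] else []) =
    (if i < l.tail.length then [l.tail.getD i 0] else []) := by
  cases l <;> simp

theorem gcol_succ (a b c : List Int) (i : Nat) :
    gcol a b c (i + 1) = gcol a.tail b.tail c.tail i := by
  unfold gcol
  rw [col_succ a, col_succ b, col_succ c]

theorem dropLast_reverse_eq (l : List Int) : l.reverse.dropLast = l.tail.reverse := by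
  cases l <;> simp

theorem append_if (p : Prop) [Decidable p] (out l : List Int) :
    (if p then out ++ l else out) = out ++ (if p then l else []) := by
  split_ifs <;> simp

theorem loop_eq_flatMap (a b c out : List Int) :
    mergeThreeLoop a.reverse b.reverse c.reverse out
      = out ++ (List.range (max (max a.length b.length) c.length)).flatMap (gcol a b c) := by
  by_cases hall : a.reverse = [] ∧ b.reverse = [] ∧ c.reverse = []
  · obtain ⟨h1, h2, h3⟩ := hall
    rw [List.reverse_eq_nil_iff] at h1 h2 h3
    subst h1; subst h2; subst h3
    rw [mergeThreeLoop]
    simp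
  · rw [mergeThreeLoop, dif_neg hall]
    have hlen : ¬ (a.length = 0 ∧ b.length = 0 ∧ c.length = 0) := by
      simp only [← List.length_eq_zero_iff, List.length_reverse] at hall
      exact hall
    set n := max (max a.length b.length) c.length with hn
    have hm : max (max a.tail.length b.tail.length) c.tail.length = n - 1 := by
      simp only [List.length_tail]; omega
    have hpos : n = (n - 1) + 1 := by omega
    simp only [append_if, List.append_assoc]
    rw [dropLast_reverse_eq a, dropLast_reverse_eq b, dropLast_reverse_eq c,
        loop_eq_flatMap a.tail b.tail c.tail, hm]
    rw [hpos, List.range_succ_eq_map, List.flatMap_cons, List.flatMap_map]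
    have hrec : ∀ i, gcol a b c i.succ = gcol a.tail b.tail c.tail i := fun i => gcol_succ a b c i
    rw [show (fun i => gcol a b c i.succ) = gcol a.tail b.tail c.tail from funext hrec]
    have hzero : gcol a b c 0 =
        (if a.reverse ≠ [] then [a.reverse.getLastD 0] else []) ++
        (if b.reverse ≠ [] then [b.reverse.getLastD 0] else []) ++
        (if c.reverse ≠ [] then [c.reverse.getLastD 0] else []) := by
      unfold gcol
      rw [col_zero a, col_zero b, col_zero c]
    rw [hzero]
    simp only [List.append_assoc]
    split_ifs <;> simp
termination_by a.length + b.length + c.length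
decreasing_by
  simp only [List.length_tail]
  omega

-- ===== VERDICT (by name: the statement is the Claim_ definition above) =====
theorem merge_three_arrays_spec : Claim_equal_merge_three_arrays := by
  intro a b c _
  unfold Spec_merge_three_arrays merge_three_arrays_alt
  rw [A_eq_flatMap, loop_eq_flatMap]
  simp
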